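-- pv_equiv track=rewrite | github.com/So6oN-Maximix/Project-EyeTracker | Codes/Code_V2.0.py | transpose
-- ===== SOURCE A (Python) =====
-- def transpose(tableau, valeur_vide=""):
--     max_len = max(len(line) for line in tableau)
--
--     transposed_tableau = []
--     for j in range(max_len):
--         line = []
--         for i in range(len(tableau)):
--             if j < len(tableau[i]):
--                 line.append(tableau[i][j])
--             else:
--                 line.append(valeur_vide)
--         transposed_tableau.append(line)
--
--     return transposed_tableau
-- ===== SOURCE B (Python) =====
-- def transpose(tableau, valeur_vide=""):
--     max_len = max(len(line) for line in tableau)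
--     padded = [list(line) + [valeur_vide] * (max_len - len(line)) for line in tableau]
--     return [list(col) for col in zip(*padded)]
-- ===== Notes on version B (the rewrite author's own statement) =====
-- stated objective: idiomatic
-- what changed: Replaces per-cell bounds-checked nested index loops with a padded rectangular copy followed by a zip(*...) transpose sweeping all rows in parallel.
import Mathlib
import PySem

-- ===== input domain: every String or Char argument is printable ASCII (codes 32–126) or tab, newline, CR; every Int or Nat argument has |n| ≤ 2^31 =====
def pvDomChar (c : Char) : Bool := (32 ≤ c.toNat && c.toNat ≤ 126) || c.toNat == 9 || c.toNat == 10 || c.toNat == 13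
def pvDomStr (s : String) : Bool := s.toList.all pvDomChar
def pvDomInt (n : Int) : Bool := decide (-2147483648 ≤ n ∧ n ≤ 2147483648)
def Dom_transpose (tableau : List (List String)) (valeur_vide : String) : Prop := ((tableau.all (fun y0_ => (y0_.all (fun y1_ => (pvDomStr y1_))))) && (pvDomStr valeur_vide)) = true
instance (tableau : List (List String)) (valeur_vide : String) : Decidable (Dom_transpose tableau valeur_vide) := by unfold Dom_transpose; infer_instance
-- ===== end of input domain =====

-- B replaces A's per-cell bounds-checked nested index loops by padding each row
-- to the maximal length and transposing the rectangle with zip(*padded) (idiomatic).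

-- ===== PORT A =====
def transpose (tableau : List (List String)) (valeur_vide : String) : List (List String) :=
  match PySem.List.max? (tableau.map (fun line => PySem.List.len line)) (fun x => x) with
  | none => []  -- Python raises ValueError here (empty tableau); excluded by Pre_
  | some maxLen =>
    (PySem.List.pyRange 0 maxLen 1).foldl (fun acc j =>
      acc ++ [(PySem.List.pyRange 0 (PySem.List.len tableau) 1).foldl (fun line i =>
        if j < PySem.List.len (PySem.List.pyGetD tableau i []) then
          line ++ [PySem.List.pyGetD (PySem.List.pyGetD tableau i []) j ""]
        else
          line ++ [valeur_vide]) []]) []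

-- ===== PORT B =====
-- termination measure helper for the zip(*rows) recursion
theorem pvSumTailLt (rows : List (List String)) (hne : rows ≠ [])
    (hall : ∀ r ∈ rows, r ≠ []) :
    ((rows.map (fun r => r.tail)).map List.length).sum < (rows.map List.length).sum := by
  induction rows with
  | nil => exact absurd rfl hne
  | cons r rest ih =>
    simp only [List.map_cons, List.sum_cons]
    have hr : r ≠ [] := hall r (by simp)
    have h1 : r.tail.length < r.length := by
      cases r with
      | nil => exact absurd rfl hr
      | cons a t => simp
    rcases rest with _ | ⟨s, rest'⟩
    · simpa using h1
    · have := ih (by simp) (fun x hx => hall x (List.mem_cons_of_mem _ hx))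
      omega

-- port of zip(*rows): emit the column of heads while every row is nonempty
def pvZipStar (rows : List (List String)) : List (List String) :=
  if h : rows.isEmpty || rows.any (fun r => r.isEmpty) then []
  else (rows.map (fun r => r.headD "")) :: pvZipStar (rows.map (fun r => r.tail))
termination_by ((rows.map List.length).sum)
decreasing_by
  simp only [List.map_subtype, List.unattach_attach]
  refine pvSumTailLt rows ?_ ?_
  · intro hnil; simp [hnil] at h
  · intro r hr hrnil
    subst hrnil
    apply h
    simp only [Bool.or_eq_true, List.any_eq_true]
    exact Or.inr ⟨[], hr, by simp⟩

def transpose_alt (tableau : List (List String)) (valeur_vide : String) : List (List String) :=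
  match PySem.List.max? (tableau.map (fun line => PySem.List.len line)) (fun x => x) with
  | none => []  -- Python raises ValueError here (empty tableau); excluded by Pre_
  | some maxLen =>
    pvZipStar (tableau.map (fun line =>
      line ++ List.replicate (maxLen - PySem.List.len line).toNat valeur_vide))

-- ===== PRECONDITION & SPEC =====
-- Pre_ excludes only the empty tableau, on which both Pythons raise ValueError (max() of an empty sequence).
def Pre_transpose (tableau : List (List String)) (valeur_vide : String) : Prop := tableau ≠ []
instance (tableau : List (List String)) (valeur_vide : String) : Decidable (Pre_transpose tableau valeur_vide) := by unfold Pre_transpose; infer_instance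
def pvWitness_transpose : List (List String) × String := ([["a"], ["b", "c"]], "x")

def Spec_transpose (tableau : List (List String)) (valeur_vide : String) (out : List (List String)) : Prop := out = transpose_alt tableau valeur_vide
instance (tableau : List (List String)) (valeur_vide : String) (out : List (List String)) : Decidable (Spec_transpose tableau valeur_vide out) := by unfold Spec_transpose; infer_instance

-- ===== CLAIM (what is proved, stated in full; the proofs are below) =====
def Claim_equal_transpose : Prop := ∀ (tableau : List (List String)) (valeur_vide : String), Dom_transpose tableau valeur_vide → Pre_transpose tableau valeur_vide → Spec_transpose tableau valeur_vide (transpose tableau valeur_vide)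

-- ===== LEMMAS AND PROOFS =====

-- zip(*rows) on a rectangle of row length n is the list of the n index-columns
theorem pvZipStar_rect (n : Nat) : ∀ (rows : List (List String)), rows ≠ [] →
    (∀ r ∈ rows, r.length = n) →
    pvZipStar rows = (List.range n).map (fun j => rows.map (fun r => r.getD j "")) := by
  induction n with
  | zero =>
    intro rows hne hlen
    rw [pvZipStar]
    have : rows.isEmpty || rows.any (fun r => r.isEmpty) := by
      rcases rows with _ | ⟨r, rest⟩
      · simp
      · have := hlen r (by simp)
        simp [List.length_eq_zero_iff.mp this]
    simp [this]
  | succ n ih =>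
    intro rows hne hlen
    rw [pvZipStar]
    have hno : ∀ r ∈ rows, r ≠ [] := by
      intro r hr hrnil
      have := hlen r hr; simp [hrnil] at this
    have hcond : ¬ (rows.isEmpty || rows.any (fun r => r.isEmpty)) := by
      simp only [Bool.or_eq_true, not_or, List.any_eq_true, not_exists]
      constructor
      · simpa [List.isEmpty_iff] using hne
      · intro r ⟨hr, hemp⟩
        exact hno r hr (List.isEmpty_iff.mp hemp)
    rw [dif_neg hcond]
    have htail : pvZipStar (rows.map (fun r => r.tail)) =
        (List.range n).map (fun j => (rows.map (fun r => r.tail)).map (fun r => r.getD j "")) := by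
      refine ih _ (by simpa using hne) ?_
      intro r hr
      obtain ⟨s, hs, rfl⟩ := List.mem_map.mp hr
      have := hlen s hs
      simp [this]
    rw [htail, List.range_succ_eq_map]
    simp only [List.map_cons, List.map_map]
    congr 1
    · refine List.map_congr_left ?_
      intro r hr
      rcases r with _ | ⟨a, t⟩
      · exact absurd rfl (hno _ hr)
      · rfl
    · refine List.map_congr_left ?_
      intro j _
      simp only [Function.comp]
      refine List.map_congr_left ?_
      intro r hr
      rcases r with _ | ⟨a, t⟩
      · exact absurd rfl (hno _ hr)
      · rfl

-- the padded row read at j < n equals A's bounds-checked cell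
theorem pvPadGet (line : List String) (v : String) (n j : Nat)
    (hle : line.length ≤ n) (hj : j < n) :
    (line ++ List.replicate (n - line.length) v).getD j "" =
      if (j : Int) < (line.length : Int) then line.getD j "" else v := by
  by_cases h : j < line.length
  · rw [if_pos (by exact_mod_cast h)]
    simp [List.getD, List.getElem?_append_left h]
  · rw [if_neg (by exact_mod_cast h)]
    have hj2 : j - line.length < n - line.length := by omega
    simp [List.getD, List.getElem?_append_right (by omega : line.length ≤ j), hj2]

-- ===== VERDICT (by name: the statement is the Claim_ definition above) =====
theorem transpose_spec : Claim_equal_transpose := by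
  intro tableau valeur_vide _ hpre
  unfold Spec_transpose transpose transpose_alt
  -- the max exists since tableau ≠ []
  obtain ⟨m, hm⟩ : ∃ m, PySem.List.max? (tableau.map (fun line => PySem.List.len line)) (fun x => x) = some m := by
    cases hcase : PySem.List.max? (tableau.map (fun line => PySem.List.len line)) (fun x => x) with
    | none =>
      rw [PySem.List.max?_eq_none_iff] at hcase
      simp [List.map_eq_nil_iff] at hcase
      exact absurd hcase hpre
    | some m => exact ⟨m, rfl⟩
  rw [hm]
  dsimp only
  have hmem := PySem.List.max?_mem hm
  have hmax := PySem.List.max?_isMax hm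
  obtain ⟨r0, _, hr0⟩ := List.mem_map.mp hmem
  have hm0 : 0 ≤ m := by
    rw [← hr0, PySem.List.len_eq]; positivity
  have hmn : m = ((m.toNat : Nat) : Int) := (Int.toNat_of_nonneg hm0).symm
  have hbound : ∀ line ∈ tableau, line.length ≤ m.toNat := by
    intro line hline
    have := hmax _ (List.mem_map.mpr ⟨line, hline, rfl⟩)
    simp only [PySem.List.len_eq] at this
    omega
  -- A side: fold → map → per-column row map
  have hA : ∀ (j : Int), (PySem.List.pyRange 0 (PySem.List.len tableau) 1).foldl (fun line i =>
        if j < PySem.List.len (PySem.List.pyGetD tableau i []) then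
          line ++ [PySem.List.pyGetD (PySem.List.pyGetD tableau i []) j ""]
        else
          line ++ [valeur_vide]) [] =
      tableau.map (fun row => if j < PySem.List.len row then PySem.List.pyGetD row j "" else valeur_vide) := by
    intro j
    have hfun : (fun (line : List String) (i : Int) =>
        if j < PySem.List.len (PySem.List.pyGetD tableau i []) then
          line ++ [PySem.List.pyGetD (PySem.List.pyGetD tableau i []) j ""]
        else
          line ++ [valeur_vide]) =
        (fun line i => line ++ [(fun row => if j < PySem.List.len row then PySem.List.pyGetD row j "" else valeur_vide) (PySem.List.pyGetD tableau i [])]) := by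
      funext line i
      exact (apply_ite (fun x => line ++ [x]) _ _ _).symm
    rw [hfun, PySem.List.foldl_append_singleton_eq_map, List.nil_append]
    have := PySem.List.map_pyGetD_pyRange_zero (xs := tableau) (d := ([] : List String))
    calc (PySem.List.pyRange 0 (PySem.List.len tableau) 1).map
          (fun i => (fun row => if j < PySem.List.len row then PySem.List.pyGetD row j "" else valeur_vide) (PySem.List.pyGetD tableau i []))
        = ((PySem.List.pyRange 0 (PySem.List.len tableau) 1).map (fun i => PySem.List.pyGetD tableau i [])).map
            (fun row => if j < PySem.List.len row then PySem.List.pyGetD row j "" else valeur_vide) := by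
          rw [List.map_map]; rfl
      _ = tableau.map (fun row => if j < PySem.List.len row then PySem.List.pyGetD row j "" else valeur_vide) := by
          rw [this]
  have hfoldA : ((PySem.List.pyRange 0 m 1).foldl (fun acc j =>
      acc ++ [(PySem.List.pyRange 0 (PySem.List.len tableau) 1).foldl (fun line i =>
        if j < PySem.List.len (PySem.List.pyGetD tableau i []) then
          line ++ [PySem.List.pyGetD (PySem.List.pyGetD tableau i []) j ""]
        else
          line ++ [valeur_vide]) []]) []) =
      (PySem.List.pyRange 0 m 1).map (fun j =>
        tableau.map (fun row => if j < PySem.List.len row then PySem.List.pyGetD row j "" else valeur_vide)) := by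
    rw [PySem.List.foldl_append_singleton_eq_map, List.nil_append]
    exact List.map_congr_left (fun j _ => hA j)
  rw [hfoldA]
  -- B side: rectangle of row length m.toNat
  have hrect : pvZipStar (tableau.map (fun line =>
      line ++ List.replicate (m - PySem.List.len line).toNat valeur_vide)) =
      (List.range m.toNat).map (fun j => (tableau.map (fun line =>
        line ++ List.replicate (m - PySem.List.len line).toNat valeur_vide)).map (fun r => r.getD j "")) := by
    refine pvZipStar_rect m.toNat _ (by simpa using hpre) ?_
    intro r hr
    obtain ⟨line, hline, rfl⟩ := List.mem_map.mp hr
    have h1 := hbound line hline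
    simp only [List.length_append, List.length_replicate, PySem.List.len_eq]
    omega
  rw [hrect]
  -- compare the two column lists entrywise
  rw [hmn, PySem.List.pyRange_one]
  simp only [Int.sub_zero, Int.toNat_natCast, List.map_map]
  refine List.map_congr_left ?_
  intro j hj
  have hjn : j < m.toNat := List.mem_range.mp hj
  simp only [Function.comp, zero_add]
  refine List.map_congr_left ?_
  intro line hline
  simp only [Function.comp]
  have h1 := hbound line hline
  have hpad := pvPadGet line valeur_vide m.toNat j h1 hjn
  have hlen : (((m.toNat : Nat) : Int) - PySem.List.len line).toNat = m.toNat - line.length := by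
    simp only [PySem.List.len_eq]; omega
  rw [hlen, hpad]
  simp only [PySem.List.len_eq]
  split
  · next h => simp [PySem.List.pyGetD_natCast]
  · rfl
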